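-- pv_equiv track=rewrite | github.com/fmgornick/code | python/csci1133/homeworks/HW6/HW6.py | allKeys
-- ===== SOURCE A (Python) =====
-- def allKeys(diction, element):
--     if diction == {} or element == []:
--         return []
--     newlist = []
--     for key in diction:
--         for value in diction[key]:
--             if value in element:
--                 if key not in newlist:
--                     newlist.append(key)
--     return sorted(newlist)
-- ===== SOURCE B (Python) =====
-- def allKeys(diction, element):
--     index = {}
--     for key in diction:
--         for value in diction[key]:
--             index.setdefault(value, set()).add(key)
--     result = set()
--     for e in element:
--         result.update(index.get(e, ()))
--     return sorted(result)
-- ===== Notes on version B (the rewrite author's own statement) =====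
-- stated objective: faster
-- what changed: B builds an inverted index value->set(keys) once and unions index buckets over element into a set, replacing A's per-value linear membership scan of element and its 'not in newlist' dedup scan.
import Mathlib
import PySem

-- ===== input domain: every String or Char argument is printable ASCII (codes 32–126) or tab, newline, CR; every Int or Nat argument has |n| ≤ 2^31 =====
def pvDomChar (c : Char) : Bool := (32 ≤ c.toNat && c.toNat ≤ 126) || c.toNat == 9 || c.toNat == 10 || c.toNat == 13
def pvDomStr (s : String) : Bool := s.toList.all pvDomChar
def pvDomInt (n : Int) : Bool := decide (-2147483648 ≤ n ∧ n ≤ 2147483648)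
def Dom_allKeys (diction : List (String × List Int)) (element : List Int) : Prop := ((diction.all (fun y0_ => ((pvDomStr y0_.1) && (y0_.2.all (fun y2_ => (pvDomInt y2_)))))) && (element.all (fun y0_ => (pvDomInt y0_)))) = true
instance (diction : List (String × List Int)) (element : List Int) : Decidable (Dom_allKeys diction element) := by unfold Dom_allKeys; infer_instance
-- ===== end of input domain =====

-- B replaces A's per-value membership scan of element plus list-dedup scan by an inverted
-- index value -> set of keys, unioned over element into a set (objective: alternative).

-- ===== PORT A =====
-- Python's diction[key] on the dict (first match in the association list; key always present here)
def pvLookup (diction : List (String × List Int)) (key : String) : List Int :=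
  ((diction.find? (fun kv => kv.1 == key)).map (·.2)).getD []

def allKeys (diction : List (String × List Int)) (element : List Int) : List String :=
  if diction = [] ∨ element = [] then []
  else
    let newlist := diction.foldl (fun nl kv =>
      (pvLookup diction kv.1).foldl (fun nl v =>
        if v ∈ element then (if kv.1 ∈ nl then nl else nl ++ [kv.1]) else nl) nl) []
    PySem.List.sorted newlist (fun x => x) false

-- ===== PORT B =====
def allKeys_alt (diction : List (String × List Int)) (element : List Int) : List String :=
  let index := diction.foldl (fun idx kv =>
    (pvLookup diction kv.1).foldl (fun idx v =>
      idx.modify v [] (fun s => PySem.Set.add s kv.1)) idx) PySem.Dict.empty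
  let result := element.foldl (fun r e => PySem.Set.update r (index.getD e [])) PySem.Set.empty
  PySem.List.sorted result (fun x => x) false

-- ===== PRECONDITION & SPEC =====
def Spec_allKeys (diction : List (String × List Int)) (element : List Int) (out : List String) : Prop := out = allKeys_alt diction element
instance (diction : List (String × List Int)) (element : List Int) (out : List String) : Decidable (Spec_allKeys diction element out) := by unfold Spec_allKeys; infer_instance

-- ===== CLAIM (what is proved, stated in full; the proofs are below) =====
def Claim_equal_allKeys : Prop := ∀ (diction : List (String × List Int)) (element : List Int), Dom_allKeys diction element → Spec_allKeys diction element (allKeys diction element)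

-- ===== LEMMAS AND PROOFS =====

-- A inner loop: membership
theorem memA_inner (element : List Int) (key : String) (vs : List Int) (nl : List String) (x : String) :
    x ∈ vs.foldl (fun nl v => if v ∈ element then (if key ∈ nl then nl else nl ++ [key]) else nl) nl ↔
      x ∈ nl ∨ (x = key ∧ ∃ v ∈ vs, v ∈ element) := by
  induction vs generalizing nl with
  | nil => simp
  | cons v vs ih =>
    simp only [List.foldl_cons, ih, List.mem_cons, exists_eq_or_imp]
    by_cases hv : v ∈ element
    · by_cases hk : key ∈ nl
      · simp only [hv, if_true, hk]
        constructor
        · rintro (h | ⟨hx, hrest⟩)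
          · exact Or.inl h
          · exact Or.inr ⟨hx, Or.inr hrest⟩
        · rintro (h | ⟨hx, _⟩)
          · exact Or.inl h
          · exact Or.inl (hx ▸ hk)
      · simp only [hv, if_true, hk, if_false, List.mem_append, List.mem_singleton]
        tauto
    · simp only [hv, if_false]
      tauto

-- A inner loop: nodup preserved
theorem nodupA_inner (element : List Int) (key : String) (vs : List Int) (nl : List String)
    (h : nl.Nodup) :
    (vs.foldl (fun nl v => if v ∈ element then (if key ∈ nl then nl else nl ++ [key]) else nl) nl).Nodup := by
  induction vs generalizing nl with
  | nil => exact h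
  | cons v vs ih =>
    simp only [List.foldl_cons]
    apply ih
    by_cases hv : v ∈ element
    · by_cases hk : key ∈ nl
      · simpa [hv, hk] using h
      · simp only [hv, if_true, hk, if_false]
        refine List.Nodup.append h (List.nodup_singleton _) ?_
        intro a ha hak
        exact hk ((List.mem_singleton.mp hak) ▸ ha)
    · simpa [hv] using h

-- A outer loop: membership
theorem memA_outer (diction : List (String × List Int)) (element : List Int)
    (l : List (String × List Int)) (nl : List String) (x : String) :
    x ∈ l.foldl (fun nl kv =>
      (pvLookup diction kv.1).foldl (fun nl v =>
        if v ∈ element then (if kv.1 ∈ nl then nl else nl ++ [kv.1]) else nl) nl) nl ↔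
      x ∈ nl ∨ ∃ kv ∈ l, x = kv.1 ∧ ∃ v ∈ pvLookup diction kv.1, v ∈ element := by
  induction l generalizing nl with
  | nil => simp
  | cons kv l ih =>
    simp only [List.foldl_cons, ih, memA_inner]
    aesop

-- A outer loop: nodup
theorem nodupA_outer (diction : List (String × List Int)) (element : List Int)
    (l : List (String × List Int)) (nl : List String) (h : nl.Nodup) :
    (l.foldl (fun nl kv =>
      (pvLookup diction kv.1).foldl (fun nl v =>
        if v ∈ element then (if kv.1 ∈ nl then nl else nl ++ [kv.1]) else nl) nl) nl).Nodup := by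
  induction l generalizing nl with
  | nil => exact h
  | cons kv l ih => exact ih _ (nodupA_inner _ _ _ _ h)

-- B index inner loop: bucket membership
theorem memB_inner (key : String) (vs : List Int) (idx : PySem.Dict Int (List String))
    (v : Int) (x : String) :
    x ∈ (vs.foldl (fun idx u => idx.modify u [] (fun s => PySem.Set.add s key)) idx).getD v [] ↔
      x ∈ idx.getD v [] ∨ (x = key ∧ v ∈ vs) := by
  induction vs generalizing idx with
  | nil => simp
  | cons u vs ih =>
    simp only [List.foldl_cons, ih, PySem.Dict.getD_modify]
    by_cases h : v = u
    · subst h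
      simp only [if_true, PySem.Set.mem_add, List.mem_cons, true_or, and_true]
      tauto
    · simp only [if_neg h, List.mem_cons]
      tauto

-- B index outer loop: bucket membership
theorem memB_outer (diction : List (String × List Int))
    (l : List (String × List Int)) (idx : PySem.Dict Int (List String)) (v : Int) (x : String) :
    x ∈ (l.foldl (fun idx kv =>
      (pvLookup diction kv.1).foldl (fun idx u =>
        idx.modify u [] (fun s => PySem.Set.add s kv.1)) idx) idx).getD v [] ↔
      x ∈ idx.getD v [] ∨ ∃ kv ∈ l, x = kv.1 ∧ v ∈ pvLookup diction kv.1 := by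
  induction l generalizing idx with
  | nil => simp
  | cons kv l ih =>
    simp only [List.foldl_cons, ih, memB_inner]
    aesop

-- B result loop: membership
theorem memB_result (idx : PySem.Dict Int (List String)) (es : List Int) (r : List String) (x : String) :
    x ∈ es.foldl (fun r e => PySem.Set.update r (idx.getD e [])) r ↔
      x ∈ r ∨ ∃ e ∈ es, x ∈ idx.getD e [] := by
  induction es generalizing r with
  | nil => simp
  | cons e es ih =>
    simp only [List.foldl_cons, ih, PySem.Set.mem_update]
    aesop

-- B result loop: nodup
theorem nodupB_result (idx : PySem.Dict Int (List String)) (es : List Int) (r : List String)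
    (h : r.Nodup) :
    (es.foldl (fun r e => PySem.Set.update r (idx.getD e [])) r).Nodup := by
  induction es generalizing r with
  | nil => exact h
  | cons e es ih => exact ih _ (PySem.Set.nodup_update _ _ h)

-- ===== VERDICT (by name: the statement is the Claim_ definition above) =====
theorem allKeys_spec : Claim_equal_allKeys := by
  intro diction element _
  unfold Spec_allKeys allKeys allKeys_alt
  have hperm :
      (diction.foldl (fun nl kv =>
        (pvLookup diction kv.1).foldl (fun nl v =>
          if v ∈ element then (if kv.1 ∈ nl then nl else nl ++ [kv.1]) else nl) nl) ([] : List String)).Perm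
      (element.foldl (fun r e =>
        PySem.Set.update r
          ((diction.foldl (fun idx kv =>
            (pvLookup diction kv.1).foldl (fun idx u =>
              idx.modify u [] (fun s => PySem.Set.add s kv.1)) idx) PySem.Dict.empty).getD e []))
        PySem.Set.empty) := by
    apply (List.perm_ext_iff_of_nodup (nodupA_outer _ _ _ _ (by simp))
      (nodupB_result _ _ _ (by simp [PySem.Set.empty]))).mpr
    intro x
    rw [memA_outer, memB_result]
    simp only [memB_outer, PySem.Dict.getD_empty, PySem.Set.empty, List.not_mem_nil, false_or]
    constructor
    · rintro ⟨kv, hkv, hx, v, hv, hve⟩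
      exact ⟨v, hve, kv, hkv, hx, hv⟩
    · rintro ⟨e, he, kv, hkv, hx, hv⟩
      exact ⟨kv, hkv, hx, e, hv, he⟩
  by_cases hd : diction = [] ∨ element = []
  · -- A's early return; B's result set is empty too
    simp only [hd, if_true]
    have : (element.foldl (fun r e =>
        PySem.Set.update r
          ((diction.foldl (fun idx kv =>
            (pvLookup diction kv.1).foldl (fun idx u =>
              idx.modify u [] (fun s => PySem.Set.add s kv.1)) idx) PySem.Dict.empty).getD e []))
        PySem.Set.empty) = [] := by
      rcases hd with h | h
      · subst h
        apply List.eq_nil_iff_forall_not_mem.mpr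
        intro x hx
        rw [memB_result] at hx
        rcases hx with hx | ⟨e, _, hmem⟩
        · exact absurd hx (by simp [PySem.Set.empty])
        · simp only [List.foldl_nil, PySem.Dict.getD_empty] at hmem
          simp at hmem
      · subst h; rfl
    rw [this]
    rfl
  · simp only [hd, if_false]
    exact (PySem.List.sorted_eq_sorted_of_perm _ _ _ (fun a b h => h) hperm)
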